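-- pv_equiv track=rewrite | github.com/DCWelch/age-grade | tools/convert_standards_to_json.py | find_age_col
-- ===== SOURCE A (Python) =====
-- def find_age_col(cols) -> str:
--     # prefer exact-ish age column
--     for c in cols:
--         cl = c.strip().lower()
--         if cl == "age" or cl.startswith("age ") or cl.startswith("age(") or cl.startswith("age/") or cl.startswith("age-"):
--             return c
--     for c in cols:
--         if "age" in c.lower():
--             return c
--     raise RuntimeError(f"Could not locate Age column. Columns: {list(cols)}")
-- ===== SOURCE B (Python) =====
-- _AGE_PREFIXES = ("age ", "age(", "age/", "age-")
--
-- def find_age_col(cols) -> str: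
--     # single pass: return the first exact-ish match immediately, remember the
--     # first loose 'age' substring match as a fallback
--     fallback = None
--     for c in cols:
--         cl = c.strip().lower()
--         if cl == "age" or cl.startswith(_AGE_PREFIXES):
--             return c
--         if fallback is None and "age" in c.lower():
--             fallback = c
--     if fallback is not None:
--         return fallback
--     raise RuntimeError(f"Could not locate Age column. Columns: {list(cols)}")
-- ===== Notes on version B (the rewrite author's own statement) =====
-- stated objective: simpler
-- what changed: A's two separate scans (strong match pass, then loose substring pass) are merged into one pass that returns a strong match immediately and remembers the first loose match as a fallback.
-- outside the precondition, e.g. on find_age_col(['name', 'time']): A raises RuntimeError, B raises RuntimeError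
import Mathlib
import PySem

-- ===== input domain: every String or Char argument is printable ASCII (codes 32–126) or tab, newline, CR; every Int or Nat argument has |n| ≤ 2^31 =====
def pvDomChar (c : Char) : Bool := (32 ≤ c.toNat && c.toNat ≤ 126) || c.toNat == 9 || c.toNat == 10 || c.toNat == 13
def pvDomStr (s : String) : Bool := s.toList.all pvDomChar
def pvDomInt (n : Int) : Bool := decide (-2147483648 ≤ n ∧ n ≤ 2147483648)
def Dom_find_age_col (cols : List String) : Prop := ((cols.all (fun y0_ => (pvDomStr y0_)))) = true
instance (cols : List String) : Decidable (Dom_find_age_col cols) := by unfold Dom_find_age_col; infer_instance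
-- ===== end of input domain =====

-- B merges A's two scans into one pass with a remembered fallback; proof is about the return value only (where Python raises, Pre_ excludes).

-- ===== PORT A =====
-- cl = c.strip().lower(); exact-ish test of the first loop
def aStrong (c : String) : Bool :=
  let cl := PySem.Str.lower (PySem.Str.strip c)
  cl == "age" || PySem.Str.startswith cl "age " || PySem.Str.startswith cl "age("
    || PySem.Str.startswith cl "age/" || PySem.Str.startswith cl "age-"

-- "age" in c.lower() : test of the second loop
def aWeak (c : String) : Bool := PySem.Str.isIn "age" (PySem.Str.lower c)

def find_age_col (cols : List String) : String :=
  -- first loop: return first exact-ish match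
  match cols.find? aStrong with
  | some c => c
  | none =>
    -- second loop: return first loose match
    match cols.find? aWeak with
    | some c => c
    | none => ""   -- Python raises RuntimeError here; excluded by Pre_

-- ===== PORT B =====
def bPrefixes : List String := ["age ", "age(", "age/", "age-"]

-- cl == "age" or cl.startswith(_AGE_PREFIXES)
def bStrong (c : String) : Bool :=
  let cl := PySem.Str.lower (PySem.Str.strip c)
  cl == "age" || bPrefixes.any (fun p => PySem.Str.startswith cl p)

-- the single loop, carrying the fallback
def bGo : List String → Option String → String
  | [], fb =>
    match fb with
    | some f => f
    | none => ""   -- Python raises RuntimeError here; excluded by Pre_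
  | c :: rest, fb =>
    if bStrong c then c
    else bGo rest (if fb.isNone && PySem.Str.isIn "age" (PySem.Str.lower c) then some c else fb)

def find_age_col_alt (cols : List String) : String := bGo cols none

-- ===== PRECONDITION & SPEC =====
-- Pre_ excludes exactly the inputs on which Python A raises RuntimeError: no column
-- whose lowercase form contains "age".
def Pre_find_age_col (cols : List String) : Prop :=
  cols.any (fun c => PySem.Str.isIn "age" (PySem.Str.lower c)) = true
instance (cols : List String) : Decidable (Pre_find_age_col cols) := by unfold Pre_find_age_col; infer_instance
def pvWitness_find_age_col : List String := ["Age (years)"]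

def Spec_find_age_col (cols : List String) (out : String) : Prop := out = find_age_col_alt cols
instance (cols : List String) (out : String) : Decidable (Spec_find_age_col cols out) := by unfold Spec_find_age_col; infer_instance

-- ===== CLAIM (what is proved, stated in full; the proofs are below) =====
def Claim_equal_find_age_col : Prop := ∀ (cols : List String), Dom_find_age_col cols → Pre_find_age_col cols → Spec_find_age_col cols (find_age_col cols)

-- ===== LEMMAS AND PROOFS =====

lemma strong_eq (c : String) : bStrong c = aStrong c := by
  simp [bStrong, aStrong, bPrefixes, List.any_cons, List.any_nil, Bool.or_assoc]

-- with a fallback already recorded, the single pass returns the first strong match or the fallback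
lemma bGo_some (cols : List String) (f : String) :
    bGo cols (some f) = ((cols.find? bStrong).getD f) := by
  induction cols with
  | nil => simp [bGo]
  | cons c rest ih =>
    by_cases h : bStrong c = true
    · simp [bGo, h, List.find?_cons, Option.getD]
    · simp at h
      simp [bGo, h, List.find?_cons, ih]

-- characterisation of the single pass starting with no fallback
lemma bGo_none (cols : List String) :
    bGo cols none =
      (match cols.find? bStrong with
       | some c => c
       | none =>
         match cols.find? aWeak with
         | some c => c
         | none => "") := by
  induction cols with
  | nil => simp [bGo]
  | cons c rest ih =>
    by_cases h : bStrong c = true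
    · simp [bGo, h, List.find?_cons]
    · simp at h
      by_cases hw : aWeak c = true
      · have hw2 : PySem.Str.isIn "age" (PySem.Str.lower c) = true := hw
        simp only [bGo, h, hw2, Option.isNone_none, Bool.and_true, if_false, if_true,
          Bool.false_eq_true, List.find?_cons, bGo_some, hw]
        cases hf : List.find? bStrong rest <;> simp
      · have hw' : PySem.Str.isIn "age" (PySem.Str.lower c) = false := by
          simpa [aWeak] using hw
        simp at hw'
        simp [bGo, h, hw', ih, aWeak]

-- ===== VERDICT (by name: the statement is the Claim_ definition above) =====
theorem find_age_col_spec : Claim_equal_find_age_col := by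
  intro cols _ _
  unfold Spec_find_age_col find_age_col find_age_col_alt
  rw [bGo_none]
  have : bStrong = aStrong := funext strong_eq
  rw [this]
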